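-- pv_equiv track=rewrite | github.com/swisskanton/javascript | calculateFibonacciReturnCountOfDigitOccurrences.py | fib_digits
-- ===== SOURCE A (Python) =====
-- def fib_digits(n):
--     fib, fib_1 = 0, 1
--     for i in range(n):
--         fib, fib_1 = fib_1, fib + fib_1
--     nums = {}
--     for i in range(10):
--         nums[i] = 0
--     numbers = str(fib)
--     for x in numbers:
--         nums[int(x)] += + 1
--     result = []
--     for i in range(10):
--         max, value = -1, -1
--         for x, y in nums.items():
--             if y >= value:
--                 value = y
--                 max = x
--         if value > 0:
--             result.append((nums[max], max))
--         nums.pop(max)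
--     return result
-- ===== SOURCE B (Python) =====
-- def fib_digits(n):
--     # fast-doubling Fibonacci: fd(k) = (F(k), F(k+1))
--     def fd(k):
--         if k <= 0:
--             return (0, 1)
--         a, b = fd(k // 2)
--         c = a * (2 * b - a)
--         d = a * a + b * b
--         return (c, d) if k % 2 == 0 else (d, c + d)
--     fib = fd(n)[0]
--     counts = [0] * 10
--     for ch in str(fib):
--         counts[int(ch)] += 1
--     pairs = [(c, d) for d, c in enumerate(counts) if c > 0]
--     return sorted(pairs, reverse=True)
-- ===== Notes on version B (the rewrite author's own statement) =====
-- stated objective: faster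
-- what changed: Fibonacci is computed by fast doubling (O(log n) big-int multiplications) instead of n additions, and the frequency ordering is produced by one reverse tuple-sort of the (count, digit) pairs instead of ten repeated max-scans over a dict.
import Mathlib
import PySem

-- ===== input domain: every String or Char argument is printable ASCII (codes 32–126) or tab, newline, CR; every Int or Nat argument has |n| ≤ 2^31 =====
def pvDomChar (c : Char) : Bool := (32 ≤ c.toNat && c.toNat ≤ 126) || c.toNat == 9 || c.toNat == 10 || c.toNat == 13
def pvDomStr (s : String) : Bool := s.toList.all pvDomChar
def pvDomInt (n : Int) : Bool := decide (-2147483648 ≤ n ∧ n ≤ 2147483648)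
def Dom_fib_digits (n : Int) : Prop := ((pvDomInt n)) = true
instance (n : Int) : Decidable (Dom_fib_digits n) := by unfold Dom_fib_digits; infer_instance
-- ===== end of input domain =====

-- B computes the Fibonacci number by fast doubling and produces the frequency order by one
-- reverse tuple-sort of the (count, digit) pairs instead of A's ten repeated max-scans (faster).

-- ===== PORT A =====
def fib_digits (n : Int) : List (List Int) :=
  let fp : Int × Int := (PySem.List.pyRange 0 n 1).foldl (fun p _ => (p.2, p.1 + p.2)) (0, 1)
  let nums0 : PySem.Dict Int Int :=
    (PySem.List.pyRange 0 10 1).foldl (fun d i => d.insert i 0) PySem.Dict.empty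
  let numbers := PySem.Int.toChars fp.1
  -- nums[int(x)] += 1: the key int(x) is always one of the keys 0..9 inserted above,
  -- so dict-modify with default 0 is exact here (no KeyError is reachable)
  let nums1 := numbers.foldl
    (fun d x => d.modify ((PySem.Int.ofChars? [x]).getD 0) 0 (· + 1)) nums0
  -- nums.pop(max): max is always a present key (found among items), so erase is exact
  let st := (PySem.List.pyRange 0 10 1).foldl
    (fun (st : List (List Int) × PySem.Dict Int Int) _ =>
      let mv := st.2.items.foldl
        (fun (mv : Int × Int) p => if p.2 ≥ mv.2 then (p.1, p.2) else mv) (-1, -1)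
      let res := if mv.2 > 0 then st.1 ++ [[st.2.getD mv.1 0, mv.1]] else st.1
      (res, st.2.erase mv.1)) ([], nums1)
  st.1

-- ===== PORT B =====
-- fd(k) of Source B: fast-doubling pair (F(k), F(k+1))
def fdAlt (k : Int) : Int × Int :=
  if k ≤ 0 then (0, 1)
  else
    let p := fdAlt (PySem.Int.floordiv k 2)
    let c := p.1 * (2 * p.2 - p.1)
    let d := p.1 * p.1 + p.2 * p.2
    if PySem.Int.mod k 2 = 0 then (c, d) else (d, c + d)
termination_by k.toNat
decreasing_by
  rename_i h
  rw [PySem.Int.floordiv_eq_ediv_of_pos (by omega : (0:Int) < 2)]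
  omega

def fib_digits_alt (n : Int) : List (List Int) :=
  let fib := (fdAlt n).1
  let counts := (PySem.Int.toChars fib).foldl
    (fun cnt ch =>
      PySem.List.pySetD cnt ((PySem.Int.ofChars? [ch]).getD 0)
        (PySem.List.pyGetD cnt ((PySem.Int.ofChars? [ch]).getD 0) 0 + 1))
    (List.replicate 10 0)
  let pairs := ((PySem.List.enumerate counts 0).filter (fun p => p.2 > 0)).map
    (fun p => (p.2, p.1))
  -- sorted(pairs, reverse=True): Python's tuple comparison is the lexicographic order
  (PySem.List.sorted pairs (fun p => (toLex p : Int ×ₗ Int)) true).map (fun p => [p.1, p.2])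

-- ===== PRECONDITION & SPEC =====
def Spec_fib_digits (n : Int) (out : List (List Int)) : Prop := out = fib_digits_alt n
instance (n : Int) (out : List (List Int)) : Decidable (Spec_fib_digits n out) := by unfold Spec_fib_digits; infer_instance

-- ===== CLAIM (what is proved, stated in full; the proofs are below) =====
def Claim_equal_fib_digits : Prop := ∀ (n : Int), Dom_fib_digits n → Spec_fib_digits n (fib_digits n)

-- ===== LEMMAS AND PROOFS =====

def fibI (m : Nat) : Int := Nat.fib m

-- a fold whose body ignores the list elements is an iterate
theorem foldl_const_iterate {α β : Type} (f : α → α) (l : List β) (init : α) :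
    l.foldl (fun a _ => f a) init = f^[l.length] init := by
  induction l generalizing init with
  | nil => rfl
  | cons x t ih => simp [List.foldl_cons, ih, Function.iterate_succ_apply]

theorem iterate_fib_step (m : Nat) :
    (fun p : Int × Int => (p.2, p.1 + p.2))^[m] (0, 1) = (fibI m, fibI (m + 1)) := by
  induction m with
  | zero => simp [fibI]
  | succ m ih =>
      rw [Function.iterate_succ_apply', ih]
      simp only [fibI, Nat.fib_add_two, Prod.mk.injEq]
      exact ⟨trivial, by push_cast; ring⟩

theorem fib_cast_two_mul (j : Nat) :
    fibI (2 * j) = fibI j * (2 * fibI (j + 1) - fibI j) := by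
  have h := Nat.fib_two_mul j
  have hle : Nat.fib j ≤ 2 * Nat.fib (j + 1) :=
    le_trans Nat.fib_le_fib_succ (by omega)
  simp only [fibI, h]
  push_cast [Nat.cast_sub hle]
  ring

theorem fdAlt_eq (k : Int) : fdAlt k = (fibI k.toNat, fibI (k.toNat + 1)) := by
  by_cases hk : k ≤ 0
  · have h0 : k.toNat = 0 := by omega
    rw [fdAlt]
    simp [hk, h0, fibI]
  · have hpos : 0 < k := by omega
    have hfd : PySem.Int.floordiv k 2 = k / 2 := PySem.Int.floordiv_eq_ediv_of_pos (by omega)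
    have ih := fdAlt_eq (k / 2)
    rw [fdAlt]
    simp only [hk, if_false, hfd, ih]
    set j := k.toNat with hj
    have hk2 : (k / 2).toNat = j / 2 := by omega
    have hmod : PySem.Int.mod k 2 = (j % 2 : Nat) := by
      rw [PySem.Int.mod_eq_emod_of_pos (by omega)]; omega
    rw [hk2, hmod]
    by_cases hpar : j % 2 = 0
    · have h2j : 2 * (j / 2) = j := by omega
      have hz : ((j % 2 : Nat) : Int) = 0 := by rw [hpar]; rfl
      rw [if_pos hz]
      have hc := fib_cast_two_mul (j / 2)
      rw [h2j] at hc
      have hd : fibI (j + 1) = fibI (j / 2 + 1) ^ 2 + fibI (j / 2) ^ 2 := by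
        have := Nat.fib_two_mul_add_one (j / 2)
        have hj1 : 2 * (j / 2) + 1 = j + 1 := by omega
        rw [hj1] at this
        simp only [fibI, this]; push_cast; ring
      rw [Prod.mk.injEq]
      exact ⟨by linear_combination -hc, by linear_combination -hd⟩
    · have hne : ((j % 2 : Nat) : Int) ≠ 0 := by omega
      simp only [if_neg hne]
      have h2j : 2 * (j / 2) + 1 = j := by omega
      have h1 : fibI j = fibI (j / 2 + 1) ^ 2 + fibI (j / 2) ^ 2 := by
        have := Nat.fib_two_mul_add_one (j / 2)
        rw [h2j] at this
        simp only [fibI, this]; push_cast; ring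
      have hc := fib_cast_two_mul (j / 2)
      have h2 : fibI (j + 1) = fibI (2 * (j / 2)) + fibI j := by
        have e1 : j + 1 = 2 * (j / 2) + 2 := by omega
        have e2 := Nat.fib_add_two (n := 2 * (j / 2))
        simp only [fibI]
        rw [e1, e2, h2j]
        push_cast; ring
      rw [Prod.mk.injEq]
      exact ⟨by linear_combination -h1, by linear_combination -h2 - hc - h1⟩
termination_by k.toNat
decreasing_by
  rw [PySem.Int.floordiv_eq_ediv_of_pos (by omega : (0:Int) < 2)] at *
  omega

-- int(x) for the single characters str(m) produces, m ≥ 0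

def keyOf (c : Char) : Int := (PySem.Int.ofChars? [c]).getD 0

theorem keyOf_digitChar (k : Nat) (h : k < 10) : keyOf (Nat.digitChar k) = (k : Int) := by
  interval_cases k <;> decide

theorem toDigitsCore_digits (fuel : Nat) : ∀ (n : Nat) (acc : List Char),
    (∀ c ∈ acc, ∃ k, k < 10 ∧ c = Nat.digitChar k) →
    ∀ c ∈ Nat.toDigitsCore 10 fuel n acc, ∃ k, k < 10 ∧ c = Nat.digitChar k := by
  induction fuel with
  | zero => intro n acc h c hc; simpa [Nat.toDigitsCore] using h c (by simpa [Nat.toDigitsCore] using hc)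
  | succ f ih =>
      intro n acc h c hc
      rw [Nat.toDigitsCore] at hc
      by_cases hz : n / 10 = 0
      · simp only [hz] at hc
        rcases List.mem_cons.mp hc with h1 | h2
        · exact ⟨n % 10, Nat.mod_lt _ (by omega), h1⟩
        · exact h c h2
      · simp only [hz] at hc
        refine ih (n / 10) _ ?_ c hc
        intro c' hc'
        rcases List.mem_cons.mp hc' with h1 | h2
        · exact ⟨n % 10, Nat.mod_lt _ (by omega), h1⟩
        · exact h c' h2

theorem keyOf_toChars_range (m : Int) (hm : 0 ≤ m) :
    ∀ c ∈ PySem.Int.toChars m, 0 ≤ keyOf c ∧ keyOf c ≤ 9 := by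
  intro c hc
  rw [PySem.Int.toChars, if_neg (by omega)] at hc
  rw [Nat.toDigits] at hc
  obtain ⟨k, hk, rfl⟩ := toDigitsCore_digits _ _ _ (by simp) c hc
  rw [keyOf_digitChar k hk]
  omega

-- the ten-key dict / ten-slot list holding value v i at digit i

def mkD (v : Int → Int) : PySem.Dict Int Int :=
  PySem.Dict.mk [(0, v 0), (1, v 1), (2, v 2), (3, v 3), (4, v 4),
                 (5, v 5), (6, v 6), (7, v 7), (8, v 8), (9, v 9)]

def mkL (v : Int → Int) : List Int :=
  [v 0, v 1, v 2, v 3, v 4, v 5, v 6, v 7, v 8, v 9]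

theorem mkD_modify (v : Int → Int) (k : Int) (h0 : 0 ≤ k) (h9 : k ≤ 9) :
    (mkD v).modify k 0 (· + 1) = mkD (fun i => if i = k then v i + 1 else v i) := by
  interval_cases k <;>
    simp [mkD, PySem.Dict.modify, PySem.Dict.insert, PySem.Dict.getD, PySem.Dict.get?]

theorem mkL_set (v : Int → Int) (k : Int) (h0 : 0 ≤ k) (h9 : k ≤ 9) :
    PySem.List.pySetD (mkL v) k (PySem.List.pyGetD (mkL v) k 0 + 1)
      = mkL (fun i => if i = k then v i + 1 else v i) := by
  interval_cases k <;>
    simp [mkL, PySem.List.pySetD, PySem.List.pySet?, PySem.List.pyGetD, PySem.List.pyGet?,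
      PySem.List.pyIdx?, List.set]

theorem count_cons_int (k x : Int) (t : List Int) :
    ((x :: t).count k : Int) = (t.count k : Int) + (if k = x then 1 else 0) := by
  by_cases h : k = x <;> simp [h, eq_comm]

theorem mkD_fold_count (ds : List Int) : ∀ (v : Int → Int),
    (∀ x ∈ ds, 0 ≤ x ∧ x ≤ 9) →
    ds.foldl (fun d k => d.modify k 0 (· + 1)) (mkD v)
      = mkD (fun i => v i + (ds.count i : Int)) := by
  induction ds with
  | nil => intro v _; simp
  | cons x t ih =>
      intro v h
      have hx := h x (by simp)
      rw [List.foldl_cons, mkD_modify v x hx.1 hx.2, ih _ (fun y hy => h y (by simp [hy]))]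
      congr 1
      funext i
      rw [count_cons_int]
      by_cases hix : i = x <;> (simp [hix]; try ring)

theorem mkL_fold_count (ds : List Int) : ∀ (v : Int → Int),
    (∀ x ∈ ds, 0 ≤ x ∧ x ≤ 9) →
    ds.foldl (fun cnt k => PySem.List.pySetD cnt k (PySem.List.pyGetD cnt k 0 + 1)) (mkL v)
      = mkL (fun i => v i + (ds.count i : Int)) := by
  induction ds with
  | nil => intro v _; simp
  | cons x t ih =>
      intro v h
      have hx := h x (by simp)
      rw [List.foldl_cons, mkL_set v x hx.1 hx.2, ih _ (fun y hy => h y (by simp [hy]))]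
      congr 1
      funext i
      rw [count_cons_int]
      by_cases hix : i = x <;> (simp [hix]; try ring)

-- ---- selection ----

-- one pass of A's selection loop
def selBody (st : List (List Int) × PySem.Dict Int Int) : List (List Int) × PySem.Dict Int Int :=
  let mv := st.2.items.foldl
    (fun (mv : Int × Int) p => if p.2 ≥ mv.2 then (p.1, p.2) else mv) (-1, -1)
  let res := if mv.2 > 0 then st.1 ++ [[st.2.getD mv.1 0, mv.1]] else st.1
  (res, st.2.erase mv.1)

-- B's whole pipeline after the counting, as a function of the (digit, count) item list
def selOut (l : List (Int × Int)) : List (List Int) :=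
  (PySem.List.sorted ((l.filter (fun p => p.2 > 0)).map (fun p => (p.2, p.1)))
    (fun p => (toLex p : Int ×ₗ Int)) true).map (fun p => [p.1, p.2])

-- A's inner max-scan returns the last element attaining the maximal count
theorem findmax_spec (l : List (Int × Int)) : ∀ (mv : Int × Int),
    l.Pairwise (fun p q => p.1 < q.1) →
    (l.foldl (fun (mv : Int × Int) p => if p.2 ≥ mv.2 then (p.1, p.2) else mv) mv = mv
        ∧ ∀ p ∈ l, p.2 < mv.2)
    ∨ (∃ r ∈ l,
        l.foldl (fun (mv : Int × Int) p => if p.2 ≥ mv.2 then (p.1, p.2) else mv) mv = r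
        ∧ mv.2 ≤ r.2 ∧ (∀ p ∈ l, p.2 ≤ r.2) ∧ (∀ p ∈ l, p.2 = r.2 → p.1 ≤ r.1)) := by
  induction l with
  | nil => intro mv _; left; exact ⟨rfl, by simp⟩
  | cons x t ih =>
      intro mv hpw
      have hpw' := (List.pairwise_cons.mp hpw).2
      have hhead := (List.pairwise_cons.mp hpw).1
      rw [List.foldl_cons]
      by_cases hge : x.2 ≥ mv.2
      · rw [if_pos hge]
        rcases ih (x.1, x.2) hpw' with ⟨heq, hlt⟩ | ⟨r, hr, heq, hle, hbnd, htie⟩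
        · right
          refine ⟨(x.1, x.2), by simp, heq, by simpa using hge, ?_, ?_⟩
          · intro p hp
            rcases List.mem_cons.mp hp with rfl | hp'
            · simp
            · exact le_of_lt (hlt p hp')
          · intro p hp _
            rcases List.mem_cons.mp hp with rfl | hp'
            · simp
            · exact absurd (hlt p hp') (by omega)
        · right
          refine ⟨r, List.mem_cons_of_mem _ hr, heq, by simp at hle; omega, ?_, ?_⟩
          · intro p hp
            rcases List.mem_cons.mp hp with rfl | hp'
            · simp at hle; omega
            · exact hbnd p hp'
          · intro p hp hpe
            rcases List.mem_cons.mp hp with rfl | hp'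
            · exact le_of_lt (hhead r hr)
            · exact htie p hp' hpe
      · rw [if_neg hge]
        rcases ih mv hpw' with ⟨heq, hlt⟩ | ⟨r, hr, heq, hle, hbnd, htie⟩
        · left
          refine ⟨heq, ?_⟩
          intro p hp
          rcases List.mem_cons.mp hp with rfl | hp'
          · omega
          · exact hlt p hp'
        · right
          refine ⟨r, List.mem_cons_of_mem _ hr, heq, hle, ?_, ?_⟩
          · intro p hp
            rcases List.mem_cons.mp hp with rfl | hp'
            · omega
            · exact hbnd p hp'
          · intro p hp hpe
            rcases List.mem_cons.mp hp with rfl | hp'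
            · omega
            · exact htie p hp' hpe

theorem perm_cons_filter_ne (l : List (Int × Int)) (r : Int × Int)
    (hpw : l.Pairwise (fun p q => p.1 < q.1)) (hr : r ∈ l) :
    l.Perm (r :: l.filter (fun p => !(p.1 == r.1))) := by
  induction l with
  | nil => cases hr
  | cons x t ih =>
      have hpw' := (List.pairwise_cons.mp hpw).2
      have hhead := (List.pairwise_cons.mp hpw).1
      rcases List.mem_cons.mp hr with rfl | hr'
      · have : t.filter (fun p => !(p.1 == r.1)) = t := by
          apply List.filter_eq_self.mpr
          intro p hp
          have := hhead p hp
          simp; omega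
        simp [this]
      · have hx : x.1 ≠ r.1 := by have := hhead r hr'; omega
        have hfx : List.filter (fun p : Int × Int => !(p.1 == r.1)) (x :: t)
            = x :: List.filter (fun p : Int × Int => !(p.1 == r.1)) t := by
          simp [hx]
        rw [hfx]
        exact ((ih hpw' hr').cons x).trans (List.Perm.swap r x _)

theorem getD_mem_of_pairwise (l : List (Int × Int)) (r : Int × Int)
    (hpw : l.Pairwise (fun p q => p.1 < q.1)) (hr : r ∈ l) :
    (PySem.Dict.mk l).getD r.1 0 = r.2 := by
  induction l with
  | nil => cases hr
  | cons x t ih =>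
      obtain ⟨xk, xv⟩ := x
      have hpw' := (List.pairwise_cons.mp hpw).2
      have hhead := (List.pairwise_cons.mp hpw).1
      rcases List.mem_cons.mp hr with rfl | hr'
      · simp [PySem.Dict.getD, PySem.Dict.get?_mk_cons]
      · have hx : xk ≠ r.1 := by have := hhead r hr'; simp at this; omega
        have := ih hpw' hr'
        simp only [PySem.Dict.getD, PySem.Dict.get?_mk_cons] at *
        rw [if_neg (by simpa using hx)]
        exact this

-- B's reverse sort is strictly descending when the second components are distinct
theorem sorted_strict_of_pairwise_snd (xs : List (Int × Int))
    (h : xs.Pairwise (fun p q => p.2 < q.2)) :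
    (PySem.List.sorted xs (fun p => (toLex p : Int ×ₗ Int)) true).Pairwise
      (fun a b => (toLex b : Int ×ₗ Int) < toLex a) := by
  have hperm := PySem.List.sorted_perm xs (fun p => (toLex p : Int ×ₗ Int)) true
  have hne : (PySem.List.sorted xs (fun p => (toLex p : Int ×ₗ Int)) true).Pairwise
      (fun a b : Int × Int => a ≠ b ∧ b ≠ a) := by
    refine (hperm.pairwise_iff ?_).mpr (h.imp ?_)
    · rintro x y ⟨h1, h2⟩; exact ⟨h2, h1⟩
    · intro a b hab
      constructor <;> (intro he; rw [he] at hab; omega)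
  have hle := PySem.List.sorted_pairwise_rev xs (fun p => (toLex p : Int ×ₗ Int))
  refine (hle.and hne).imp ?_
  rintro a b ⟨h1, h2, _⟩
  exact lt_of_le_of_ne h1 (by
    intro he
    exact h2 (by
      have := congrArg (fun x : Int ×ₗ Int => (ofLex x : Int × Int)) he
      simpa using this.symm))

-- A's selection loop produces exactly B's sorted output
theorem sel_loop (k : Nat) : ∀ (d : PySem.Dict Int Int) (acc : List (List Int)),
    d.items.length = k →
    d.items.Pairwise (fun p q => p.1 < q.1) →
    (∀ p ∈ d.items, 0 ≤ p.2) →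
    (selBody^[k] (acc, d)).1 = acc ++ selOut d.items := by
  induction k with
  | zero =>
      intro d acc hlen _ _
      have : d.items = [] := List.length_eq_zero_iff.mp hlen
      simp [this, selOut, PySem.List.sorted]
  | succ k ih =>
      intro d acc hlen hpw hnn
      set l := d.items with hl
      have hne : l ≠ [] := by intro h; rw [h] at hlen; simp at hlen
      rcases findmax_spec l (-1, -1) hpw with ⟨_, hlt⟩ | ⟨r, hr, heq, _, hbnd, htie⟩
      · obtain ⟨p0, hp0⟩ := List.exists_mem_of_ne_nil l hne
        have := hlt p0 hp0
        have := hnn p0 hp0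
        omega
      · have herase : (d.erase r.1).items = l.filter (fun p => !(p.1 == r.1)) := rfl
        set l' := l.filter (fun p => !(p.1 == r.1)) with hl'
        have hP : l.Perm (r :: l') := perm_cons_filter_ne l r hpw hr
        have hlen' : l'.length = k := by
          have := hP.length_eq
          simp at this; omega
        have hpw' : l'.Pairwise (fun p q => p.1 < q.1) :=
          hpw.sublist List.filter_sublist
        have hnn' : ∀ p ∈ l', 0 ≤ p.2 := fun p hp => hnn p (List.mem_of_mem_filter hp)
        have hstep : selBody (acc, d)
            = (if r.2 > 0 then acc ++ [[r.2, r.1]] else acc, d.erase r.1) := by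
          show (_, _) = _
          rw [show d.items.foldl (fun (mv : Int × Int) p => if p.2 ≥ mv.2 then (p.1, p.2) else mv) (-1, -1) = r from heq]
          rw [getD_mem_of_pairwise l r hpw hr]
        rw [Function.iterate_succ_apply, hstep,
          ih (d.erase r.1) _ (by rw [herase]; exact hlen') (by rw [herase]; exact hpw')
            (by rw [herase]; exact hnn'), herase]
        by_cases hpos : r.2 > 0
        · rw [if_pos hpos]
          have hSperm : ((l.filter (fun p => p.2 > 0)).map (fun p => (p.2, p.1))).Perm
              ((r.2, r.1) :: (l'.filter (fun p => p.2 > 0)).map (fun p => (p.2, p.1))) := by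
            have h1 : (l.filter (fun p => p.2 > 0)).Perm (r :: l'.filter (fun p => p.2 > 0)) := by
              have := hP.filter (fun p => decide (p.2 > 0))
              rwa [List.filter_cons_of_pos (by simpa using hpos)] at this
            simpa using h1.map (fun p => (p.2, p.1))
          have hsnd' : ((l'.filter (fun p => p.2 > 0)).map (fun p => (p.2, p.1))).Pairwise
              (fun a b => a.2 < b.2) := by
            rw [List.pairwise_map]
            exact (hpw'.sublist List.filter_sublist).imp (fun h => h)
          have hdec : PySem.List.sorted ((l.filter (fun p => p.2 > 0)).map (fun p => (p.2, p.1)))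
              (fun p => (toLex p : Int ×ₗ Int)) true
              = (r.2, r.1) :: PySem.List.sorted ((l'.filter (fun p => p.2 > 0)).map (fun p => (p.2, p.1)))
                  (fun p => (toLex p : Int ×ₗ Int)) true := by
            apply PySem.List.sorted_rev_eq_of_perm_of_pairwise_gt
            · exact ((PySem.List.sorted_perm _ _ _).cons (r.2, r.1)).trans hSperm.symm
            · rw [List.pairwise_cons]
              constructor
              · intro q hq
                have hq' := (PySem.List.mem_sorted _ _ _ _).mp hq
                obtain ⟨p, hpmem, rfl⟩ := List.mem_map.mp hq'
                have hpl : p ∈ l := List.mem_of_mem_filter (List.mem_of_mem_filter hpmem)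
                have hpne : p.1 ≠ r.1 := by
                  have := List.of_mem_filter (List.mem_of_mem_filter hpmem : p ∈ l')
                  simpa using this
                rw [Prod.Lex.lt_iff]
                have h1 := hbnd p hpl
                rcases lt_or_eq_of_le h1 with h | h
                · left; simpa using h
                · right
                  refine ⟨by simpa using h, ?_⟩
                  have := htie p hpl h
                  simp only [ofLex_toLex]
                  omega
              · exact sorted_strict_of_pairwise_snd _ hsnd'
          rw [selOut, selOut, hdec]
          simp
        · rw [if_neg hpos]
          have hzero : ∀ p ∈ l, ¬ (p.2 > 0) := by
            intro p hp
            have := hbnd p hp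
            omega
          have hf : l.filter (fun p => p.2 > 0) = [] := by
            rw [List.filter_eq_nil_iff]
            intro p hp; simpa using hzero p hp
          have hf' : l'.filter (fun p => p.2 > 0) = [] := by
            rw [List.filter_eq_nil_iff]
            intro p hp; simpa using hzero p (List.mem_of_mem_filter hp)
          rw [selOut, selOut, hf, hf']

-- ===== VERDICT (by name: the statement is the Claim_ definition above) =====
theorem fib_digits_spec : Claim_equal_fib_digits := by
  intro n _
  unfold Spec_fib_digits
  have hfibnn : 0 ≤ fibI n.toNat := by unfold fibI; positivity
  have hrange : ∀ x ∈ (PySem.Int.toChars (fibI n.toNat)).map keyOf, 0 ≤ x ∧ x ≤ 9 := by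
    intro x hx
    obtain ⟨c, hc, rfl⟩ := List.mem_map.mp hx
    exact keyOf_toChars_range _ hfibnn c hc
  set cfun : Int → Int :=
    fun i => 0 + (((PySem.Int.toChars (fibI n.toNat)).map keyOf).count i : Int) with hcfun
  have hitems_pw : (mkD cfun).items.Pairwise (fun p q => p.1 < q.1) := by
    simp [mkD, List.pairwise_cons]
  have hitems_nn : ∀ p ∈ (mkD cfun).items, 0 ≤ p.2 := by
    intro p hp
    simp [mkD] at hp
    rcases hp with rfl|rfl|rfl|rfl|rfl|rfl|rfl|rfl|rfl|rfl <;> simp [hcfun]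
  have hsel := sel_loop 10 (mkD cfun) [] rfl hitems_pw hitems_nn
  have hfp : (PySem.List.pyRange 0 n 1).foldl (fun (p : Int × Int) _ => (p.2, p.1 + p.2)) (0, 1)
      = (fibI n.toNat, fibI (n.toNat + 1)) := by
    refine (foldl_const_iterate (fun p : Int × Int => (p.2, p.1 + p.2)) _ _).trans ?_
    rw [PySem.List.length_pyRange_one]
    norm_num [iterate_fib_step]
  have hinit : (PySem.List.pyRange 0 10 1).foldl
      (fun (d : PySem.Dict Int Int) i => d.insert i 0) PySem.Dict.empty
      = mkD (fun _ => 0) := by decide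
  have hmap : (PySem.Int.toChars (fibI n.toNat)).foldl
      (fun d x => d.modify ((PySem.Int.ofChars? [x]).getD 0) 0 (· + 1)) (mkD fun _ => 0)
      = mkD cfun := by
    have h2 := List.foldl_map (f := keyOf)
      (g := fun (d : PySem.Dict Int Int) k => d.modify k 0 (· + 1))
      (l := PySem.Int.toChars (fibI n.toNat)) (init := mkD fun _ => 0)
    exact h2.symm.trans (mkD_fold_count _ _ hrange)
  have hiterA : (PySem.List.pyRange 0 10 1).foldl
      (fun (st : List (List Int) × PySem.Dict Int Int) _ =>
        let mv := st.2.items.foldl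
          (fun (mv : Int × Int) p => if p.2 ≥ mv.2 then (p.1, p.2) else mv) (-1, -1)
        let res := if mv.2 > 0 then st.1 ++ [[st.2.getD mv.1 0, mv.1]] else st.1
        (res, st.2.erase mv.1)) ([], mkD cfun)
      = selBody^[10] ([], mkD cfun) := by
    refine (foldl_const_iterate selBody _ _).trans ?_
    rw [PySem.List.length_pyRange_one]
    congr 1
  have hA : fib_digits n = selOut (mkD cfun).items := by
    simp only [fib_digits]
    rw [hfp]
    dsimp only
    rw [hinit, hmap, hiterA, hsel]
    simp
  have hmapL : (PySem.Int.toChars (fibI n.toNat)).foldl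
      (fun cnt ch =>
        PySem.List.pySetD cnt ((PySem.Int.ofChars? [ch]).getD 0)
          (PySem.List.pyGetD cnt ((PySem.Int.ofChars? [ch]).getD 0) 0 + 1))
      (List.replicate 10 0)
      = mkL cfun := by
    have h2 := List.foldl_map (f := keyOf)
      (g := fun (cnt : List Int) k => PySem.List.pySetD cnt k (PySem.List.pyGetD cnt k 0 + 1))
      (l := PySem.Int.toChars (fibI n.toNat)) (init := mkL fun _ => 0)
    exact h2.symm.trans (mkL_fold_count _ _ hrange)
  have henum : PySem.List.enumerate (mkL cfun) 0 = (mkD cfun).items := rfl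
  have hB : fib_digits_alt n = selOut (mkD cfun).items := by
    simp only [fib_digits_alt]
    rw [fdAlt_eq n]
    dsimp only
    rw [hmapL, henum]
    rfl
  rw [hA, hB]
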